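-- pv_equiv track=rewrite | github.com/Shildifreak/MCG_CRAFT | lib/voxelengine/modules/binary_dict3.py | binary_zip
-- ===== SOURCE A (Python) =====
-- import itertools
--
-- def binary_zip(x,y,z):
--     xs, ys, zs = x<0, y<0, z<0
--     signs = (xs<<2) | (ys<<1) | zs
--     x ^= -xs
--     y ^= -ys
--     z ^= -zs
--     bx = bin(x)[:1:-1]
--     by = bin(y)[:1:-1]
--     bz = bin(z)[:1:-1]
--     #ints_zipped = "".join(itertools.chain.from_iterable(itertools.zip_longest(bz,by,bx,fillvalue="0")))[::-1]
--     ints_zipped = tuple(int(x+y+z,2) for x,y,z in itertools.zip_longest(bx,by,bz,fillvalue="0"))[::-1]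
--     if ints_zipped == (0,):
--         return signs, ()
--     return signs, ints_zipped
-- ===== SOURCE B (Python) =====
-- def binary_zip(x, y, z):
--     signs = ((x < 0) << 2) | ((y < 0) << 1) | (z < 0)
--     vx = x if x >= 0 else ~x
--     vy = y if y >= 0 else ~y
--     vz = z if z >= 0 else ~z
--     groups = []
--     while vx or vy or vz:
--         groups.append(((vx & 1) << 2) | ((vy & 1) << 1) | (vz & 1))
--         vx >>= 1
--         vy >>= 1
--         vz >>= 1
--     return signs, tuple(reversed(groups))
-- ===== Notes on version B (the rewrite author's own statement) =====
-- stated objective: simpler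
-- what changed: B replaces A's string machinery (bin() formatting, reversed string slices, itertools.zip_longest over characters, int(...,2) re-parsing, and a (0,) special case) with one fused numeric loop that extracts and packs the three low bits arithmetically until all magnitudes are exhausted; the all-zero case falls out of the loop naturally.
import Mathlib
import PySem

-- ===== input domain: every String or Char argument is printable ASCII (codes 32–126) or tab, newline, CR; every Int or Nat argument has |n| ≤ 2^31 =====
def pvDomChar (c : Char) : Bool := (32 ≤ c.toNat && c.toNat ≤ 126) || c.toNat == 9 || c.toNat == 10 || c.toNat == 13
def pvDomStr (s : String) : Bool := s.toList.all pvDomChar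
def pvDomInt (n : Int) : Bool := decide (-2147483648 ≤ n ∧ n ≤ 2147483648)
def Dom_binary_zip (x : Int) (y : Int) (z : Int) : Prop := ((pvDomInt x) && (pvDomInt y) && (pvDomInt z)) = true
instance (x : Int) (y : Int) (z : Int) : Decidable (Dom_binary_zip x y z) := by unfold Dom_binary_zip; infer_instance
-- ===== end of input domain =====

-- B replaces A's string-based bit interleaving (bin(), zip_longest over characters,
-- int(...,2) re-parsing, (0,) special case) with one fused numeric bit-extraction loop; objective: simpler.

-- ===== PORT A =====
-- bin(n)[:1:-1] for n ≥ 0 is the LSB-first list of binary digits, except bin(0)[:1:-1] = "0".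
-- pvBits n is that digit list for n > 0 ([] for 0); exact digit-for-digit on Nat (n = toNat of a
-- nonnegative Python int).
def pvBits (n : Nat) : List Nat :=
  if h : n = 0 then [] else n % 2 :: pvBits (n / 2)
termination_by n
decreasing_by exact Nat.div_lt_self (Nat.pos_of_ne_zero h) one_lt_two

-- bin(n)[:1:-1] for n ≥ 0, including the "0" for n = 0.
def pvBinDigits (n : Nat) : List Nat := if n = 0 then [0] else pvBits n

-- itertools.zip_longest(bx, by, bz, fillvalue="0") followed by int(x+y+z, 2) on each triple:
-- each missing digit is 0, and int(dx+dy+dz, 2) = dx*4 + dy*2 + dz; exact.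
def pvZip3 (as bs cs : List Nat) : List Nat :=
  if as = [] ∧ bs = [] ∧ cs = [] then []
  else ((as.headD 0) * 4 + (bs.headD 0) * 2 + cs.headD 0) :: pvZip3 as.tail bs.tail cs.tail
termination_by as.length + bs.length + cs.length
decreasing_by
  rcases as with _ | ⟨a, as⟩ <;> rcases bs with _ | ⟨b, bs⟩ <;> rcases cs with _ | ⟨c, cs⟩ <;>
    simp_all <;> omega

def binary_zip (x : Int) (y : Int) (z : Int) : Int × List Int :=
  let xs : Int := if x < 0 then 1 else 0   -- bool x<0 used as an int
  let ys : Int := if y < 0 then 1 else 0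
  let zs : Int := if z < 0 then 1 else 0
  -- (xs<<2) | (ys<<1) | zs ; for the nonnegative bits xs,ys,zs, << is multiplication by 4 / 2 (exact)
  let signs : Int := PySem.Int.bor (PySem.Int.bor (xs * 4) (ys * 2)) zs
  let x' : Int := PySem.Int.bxor x (-xs)   -- x ^= -xs
  let y' : Int := PySem.Int.bxor y (-ys)
  let z' : Int := PySem.Int.bxor z (-zs)
  let bx := pvBinDigits x'.toNat           -- bin(x)[:1:-1]; x' ≥ 0 so toNat is exact
  let bY := pvBinDigits y'.toNat
  let bz := pvBinDigits z'.toNat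
  let ints_zipped := (pvZip3 bx bY bz).reverse   -- tuple(...)[::-1]
  if ints_zipped = [0] then (signs, [])
  else (signs, ints_zipped.map Int.ofNat)

-- ===== PORT B =====
-- the while loop of Source B: append ((vx&1)<<2)|((vy&1)<<1)|(vz&1) while any magnitude is nonzero,
-- shifting each right by 1; on the nonnegative magnitudes &1 is %2, >>1 is /2, and | of the
-- disjoint bits is the sum (exact).
def pvGroups (a b c : Nat) : List Nat :=
  if a = 0 ∧ b = 0 ∧ c = 0 then []
  else (a % 2 * 4 + b % 2 * 2 + c % 2) :: pvGroups (a / 2) (b / 2) (c / 2)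
termination_by a + b + c
decreasing_by omega

def binary_zip_alt (x : Int) (y : Int) (z : Int) : Int × List Int :=
  let xs : Int := if x < 0 then 1 else 0
  let ys : Int := if y < 0 then 1 else 0
  let zs : Int := if z < 0 then 1 else 0
  let signs : Int := PySem.Int.bor (PySem.Int.bor (xs * 4) (ys * 2)) zs
  let vx : Int := if 0 ≤ x then x else -x - 1   -- x if x >= 0 else ~x
  let vy : Int := if 0 ≤ y then y else -y - 1
  let vz : Int := if 0 ≤ z then z else -z - 1
  -- magnitudes are ≥ 0, so the loop runs on their Nat values (exact)
  (signs, ((pvGroups vx.toNat vy.toNat vz.toNat).reverse).map Int.ofNat)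

-- ===== PRECONDITION & SPEC =====
def Spec_binary_zip (x : Int) (y : Int) (z : Int) (out : Int × List Int) : Prop := out = binary_zip_alt x y z
instance (x : Int) (y : Int) (z : Int) (out : Int × List Int) : Decidable (Spec_binary_zip x y z out) := by unfold Spec_binary_zip; infer_instance

-- ===== CLAIM (what is proved, stated in full; the proofs are below) =====
def Claim_equal_binary_zip : Prop := ∀ (x : Int) (y : Int) (z : Int), Dom_binary_zip x y z → Spec_binary_zip x y z (binary_zip x y z)

-- ===== LEMMAS AND PROOFS =====

theorem pv_bxor_neg_one (x : Int) : PySem.Int.bxor x (-1) = -x - 1 := by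
  unfold PySem.Int.bxor
  split_ifs <;> norm_num <;> omega

-- x ^ -(x<0) computes the magnitude x (x ≥ 0) or ~x = -x-1 (x < 0)
theorem pv_mag (x : Int) :
    PySem.Int.bxor x (-(if x < 0 then (1 : Int) else 0)) = if 0 ≤ x then x else -x - 1 := by
  by_cases h : x < 0
  · rw [if_pos h, if_neg (by omega), pv_bxor_neg_one]
  · rw [if_neg h, if_pos (by omega)]
    simp [PySem.Int.bxor_zero]

theorem pvBits_zero : pvBits 0 = [] := by rw [pvBits.eq_def]; simp

theorem pvBits_eq_nil (n : Nat) : pvBits n = [] ↔ n = 0 := by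
  rw [pvBits.eq_def]; split_ifs with h <;> simp [h]

theorem pvBits_headD (n : Nat) : (pvBits n).headD 0 = n % 2 := by
  rw [pvBits.eq_def]; split_ifs with h <;> simp [h]

theorem pvBits_tail (n : Nat) : (pvBits n).tail = pvBits (n / 2) := by
  rw [pvBits.eq_def]; split_ifs with h
  · subst h; rw [pvBits.eq_def]; simp
  · simp

theorem pvBinDigits_ne_nil (n : Nat) : pvBinDigits n ≠ [] := by
  unfold pvBinDigits; split_ifs with h
  · simp
  · rw [pvBits.eq_def]; simp [h]

theorem pvBinDigits_headD (n : Nat) : (pvBinDigits n).headD 0 = n % 2 := by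
  unfold pvBinDigits; split_ifs with h
  · simp [h]
  · exact pvBits_headD n

theorem pvBinDigits_tail (n : Nat) : (pvBinDigits n).tail = pvBits (n / 2) := by
  unfold pvBinDigits; split_ifs with h
  · subst h; simp [pvBits_zero]
  · exact pvBits_tail n

theorem pvGroups_eq_nil (a b c : Nat) : pvGroups a b c = [] ↔ a = 0 ∧ b = 0 ∧ c = 0 := by
  rw [pvGroups.eq_def]; split_ifs with h <;> simp [h]

theorem pvGroups_cons (a b c : Nat) (h : ¬(a = 0 ∧ b = 0 ∧ c = 0)) :
    pvGroups a b c = (a % 2 * 4 + b % 2 * 2 + c % 2) :: pvGroups (a / 2) (b / 2) (c / 2) := by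
  rw [pvGroups.eq_def, if_neg h]

theorem pvZip3_cons (as bs cs : List Nat) (h : ¬(as = [] ∧ bs = [] ∧ cs = [])) :
    pvZip3 as bs cs =
      ((as.headD 0) * 4 + (bs.headD 0) * 2 + cs.headD 0) :: pvZip3 as.tail bs.tail cs.tail := by
  rw [pvZip3.eq_def, if_neg h]

-- zipping the raw LSB-first digit lists is exactly B's loop
theorem pvZip_bits (a b c : Nat) : pvZip3 (pvBits a) (pvBits b) (pvBits c) = pvGroups a b c := by
  fun_induction pvGroups a b c with
  | case1 a b c h =>
    obtain ⟨ha, hb, hc⟩ := h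
    subst ha; subst hb; subst hc
    rw [pvBits_zero, pvZip3.eq_def]; simp
  | case2 a b c h ih =>
    rw [pvZip3_cons _ _ _ (by simp [pvBits_eq_nil]; omega)]
    rw [pvBits_headD, pvBits_headD, pvBits_headD, pvBits_tail, pvBits_tail, pvBits_tail, ih]

-- away from the all-zero case, A's zip over bin-digit lists equals B's loop
theorem pvZip_binDigits (a b c : Nat) (h : ¬(a = 0 ∧ b = 0 ∧ c = 0)) :
    pvZip3 (pvBinDigits a) (pvBinDigits b) (pvBinDigits c) = pvGroups a b c := by
  rw [pvZip3_cons _ _ _ (by simp [pvBinDigits_ne_nil])]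
  rw [pvBinDigits_headD, pvBinDigits_headD, pvBinDigits_headD,
      pvBinDigits_tail, pvBinDigits_tail, pvBinDigits_tail, pvZip_bits,
      pvGroups_cons a b c h]

theorem pvGroups_ne_single_zero (a b c : Nat) (h : ¬(a = 0 ∧ b = 0 ∧ c = 0)) :
    pvGroups a b c ≠ [0] := by
  rw [pvGroups_cons a b c h]
  intro hcons
  have h1 : a % 2 * 4 + b % 2 * 2 + c % 2 = 0 := by simpa using congrArg (List.headD · 1) hcons
  have h2 : pvGroups (a / 2) (b / 2) (c / 2) = [] := by simpa using congrArg List.tail hcons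
  rw [pvGroups_eq_nil] at h2
  omega

theorem pvZip_all_zero : pvZip3 (pvBinDigits 0) (pvBinDigits 0) (pvBinDigits 0) = [0] := by
  unfold pvBinDigits; simp only [reduceIte]
  rw [pvZip3_cons _ _ _ (by simp)]
  simp [pvZip3.eq_def]

-- ===== VERDICT (by name: the statement is the Claim_ definition above) =====
theorem binary_zip_spec : Claim_equal_binary_zip := by
  intro x y z _
  unfold Spec_binary_zip binary_zip binary_zip_alt
  simp only [pv_mag]
  by_cases h : ((if 0 ≤ x then x else -x - 1).toNat = 0 ∧ (if 0 ≤ y then y else -y - 1).toNat = 0 ∧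
      (if 0 ≤ z then z else -z - 1).toNat = 0)
  · obtain ⟨hx, hy, hz⟩ := h
    rw [hx, hy, hz, pvZip_all_zero]
    rw [show pvGroups 0 0 0 = [] from (pvGroups_eq_nil 0 0 0).2 ⟨rfl, rfl, rfl⟩]
    simp
  · rw [pvZip_binDigits _ _ _ h]
    have hne : (pvGroups (if 0 ≤ x then x else -x - 1).toNat (if 0 ≤ y then y else -y - 1).toNat
        (if 0 ≤ z then z else -z - 1).toNat).reverse ≠ [0] := by
      intro hrev
      exact pvGroups_ne_single_zero _ _ _ h (by simpa using congrArg List.reverse hrev)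
    rw [if_neg hne]
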